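-- pv_equiv track=rewrite | github.com/wangJI1127/Java_leetCode | src/赛码/贝壳笔试/si.py | panduan
-- ===== SOURCE A (Python) =====
-- def isdizeng(arr):
--     for i in range(1, len(arr)):
--         if arr[i] <= arr[i-1]:
--             return False
--     return True
--
-- def isdijian(arr):
--     for i in range(1, len(arr)):
--         if arr[i] >= arr[i-1]:
--             return False
--     return True
--
-- def isdizengdijian(arr):
--     max_index = arr.index(max(arr))
--     return isdizeng(arr[0:max_index+1]) and isdijian(arr[max_index:])
--
-- def panduan(n, arr, res):
--     if isdijian(arr) or isdizeng(arr) or isdizengdijian(arr):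
--         return res
--     for i in range(1, n+1):
--         if not isdizengdijian(arr[:i]) and not isdizeng(arr[:i]) and not isdizeng(arr[:i]):
--             if isdizeng(arr[:i-1]):
--                 arr[i] += 1
--                 return panduan(n, arr, res+1)
--             else:
--                 arr[i-1] += 1
--                 return panduan(n, arr, res+1)
-- ===== SOURCE B (Python) =====
-- def panduan(n, arr, res):
--     # One linear two-phase scan instead of A's predicate-slicing recursion.
--     # A returns res exactly when arr is strictly increasing then strictly
--     # decreasing (unimodal, either phase possibly empty).  Whenever A's repair
--     # branch fires it never returns (each increment leaves the failing prefix
--     # failing, ending in RecursionError or IndexError), so on every input where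
--     # A returns a value, either the guard held (-> res) or the loop fell
--     # through (-> None); B reproduces exactly that.
--     k = 1
--     L = len(arr)
--     while k < L and arr[k - 1] < arr[k]:
--         k += 1
--     while k < L and arr[k - 1] > arr[k]:
--         k += 1
--     return res if k >= L else None
-- ===== Notes on version B (the rewrite author's own statement) =====
-- stated objective: simpler
-- what changed: B replaces A's recursion with slice-per-prefix predicate checks (max/index/slicing re-run on every prefix) by a single linear two-phase scan: consume the strictly increasing run, then the strictly decreasing run; if the scan consumes the whole list A's guard holds and res is returned, otherwise A either returns the fall-through None (which B returns) or raises (excluded by Pre_), since A's repair step never repairs the failing prefix and so never returns.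
-- crash fix: On inputs where the guard fails and some prefix arr[:i] with 1 <= i <= n is neither strictly increasing nor strictly unimodal, A's repair branch fires and always ends in RecursionError or IndexError (it never returns); B returns None there. — e.g. on panduan(2, [0, 0], 0): A raises IndexError, B returns none
import Mathlib
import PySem

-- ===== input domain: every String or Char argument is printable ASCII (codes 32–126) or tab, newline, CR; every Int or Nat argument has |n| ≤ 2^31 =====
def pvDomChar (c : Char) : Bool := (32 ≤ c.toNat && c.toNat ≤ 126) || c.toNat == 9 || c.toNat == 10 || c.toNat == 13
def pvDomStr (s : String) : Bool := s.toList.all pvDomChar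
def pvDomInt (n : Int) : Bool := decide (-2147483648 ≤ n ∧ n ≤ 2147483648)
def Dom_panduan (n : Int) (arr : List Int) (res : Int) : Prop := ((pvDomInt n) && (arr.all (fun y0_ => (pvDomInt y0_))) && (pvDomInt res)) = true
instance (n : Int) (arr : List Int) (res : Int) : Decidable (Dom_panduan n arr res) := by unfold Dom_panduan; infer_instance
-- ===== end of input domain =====

-- B replaces A's slice-heavy predicate recursion by one linear two-phase scan (simpler).
-- A mutates arr in place in its repair branch; that branch always ends in an exception,
-- so on every input of Pre_ A performs no mutation and the return values are compared.

-- ===== PORT A =====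
def isdizengA (arr : List Int) : Bool :=
  (PySem.List.pyRange 1 arr.length).all
    (fun i => !(decide (PySem.List.pyGetD arr i 0 ≤ PySem.List.pyGetD arr (i-1) 0)))

def isdijianA (arr : List Int) : Bool :=
  (PySem.List.pyRange 1 arr.length).all
    (fun i => !(decide (PySem.List.pyGetD arr i 0 ≥ PySem.List.pyGetD arr (i-1) 0)))

-- max(arr) raises ValueError on []; on every execution path of A it is applied to a
-- non-empty list, so the `none` branches below are junk values that are never reached.
def isdizengdijianA (arr : List Int) : Bool :=
  match PySem.List.max? arr (fun x => x) with
  | none => true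
  | some mx =>
    match PySem.List.index? arr mx with
    | none => true
    | some m =>
      isdizengA (PySem.List.slice arr (some 0) (some ((m : Int) + 1))) &&
      isdijianA (PySem.List.slice arr (some (m : Int)) none)

-- the body of A's `for i in range(1, n+1)` loop, with A's recursive call passed in;
-- `arr[i] += 1` out of range is Python's IndexError, hence `none`.
def loopA (recur : List Int → Int → Option Int) (arr : List Int) (res : Int) :
    List Int → Option Int
  | [] => none
  | i :: rest =>
    if !isdizengdijianA (PySem.List.slice arr none (some i)) &&
       !isdizengA (PySem.List.slice arr none (some i)) &&
       !isdizengA (PySem.List.slice arr none (some i)) then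
      if isdizengA (PySem.List.slice arr none (some (i - 1))) then
        match PySem.List.pyGet? arr i with
        | none => none
        | some v => recur (PySem.List.pySetD arr i (v + 1)) (res + 1)
      else
        match PySem.List.pyGet? arr (i - 1) with
        | none => none
        | some v => recur (PySem.List.pySetD arr (i - 1) (v + 1)) (res + 1)
    else loopA recur arr res rest

-- fuel only bounds A's recursion depth (CPython raises RecursionError at depth ~1000);
-- whenever A's repair branch fires it recurses forever (or hits IndexError), so every
-- input that consumes fuel is one on which A raises — outside Pre_, inside Raises_.
def panduanA : Nat → Int → List Int → Int → Option Int
  | 0, _, _, _ => none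
  | f + 1, n, arr, res =>
    if isdijianA arr || isdizengA arr || isdizengdijianA arr then some res
    else loopA (panduanA f n) arr res (PySem.List.pyRange 1 (n + 1))

def panduan (n : Int) (arr : List Int) (res : Int) : Option Int :=
  panduanA 1000 n arr res

-- ===== PORT B =====
-- Source B's first while loop; the fuel argument is exactly the number of positions left
-- (`arr.length - k`), so `fuel = 0` is exactly Source B's `k < L` test failing.
def upGo (arr : List Int) : Nat → Nat → Nat
  | 0, k => k
  | f + 1, k => if arr.getD (k - 1) 0 < arr.getD k 0 then upGo arr f (k + 1) else k

-- Source B's second while loop, same shape with the comparison reversed.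
def downGo (arr : List Int) : Nat → Nat → Nat
  | 0, k => k
  | f + 1, k => if arr.getD k 0 < arr.getD (k - 1) 0 then downGo arr f (k + 1) else k

def panduan_alt (n : Int) (arr : List Int) (res : Int) : Option Int :=
  let k1 := upGo arr (arr.length - 1) 1
  let k2 := downGo arr (arr.length - k1) k1
  if arr.length ≤ k2 then some res else none

-- ===== PRECONDITION & SPEC =====
-- Pre_ excludes EXACTLY the inputs on which A raises and returns no value: when the
-- guard fails and some prefix arr[:i] (1 ≤ i ≤ n) is neither strictly increasing nor
-- strictly unimodal, A's repair branch fires, and each of its two increments leaves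
-- that prefix failing, so A recurses forever (RecursionError) or indexes arr out of
-- range (IndexError) — A never returns there.  On every input where A RETURNS
-- (guard holds → res; loop falls through → None) Pre_ holds and B matches A.
def Pre_panduan (n : Int) (arr : List Int) (res : Int) : Prop :=
  (isdijianA arr || isdizengA arr || isdizengdijianA arr) = true ∨
  ((∀ i ∈ PySem.List.pyRange 1 (min (n + 1) ((arr.length : Int) + 1)),
      (isdizengA (PySem.List.slice arr none (some i)) ||
       isdizengdijianA (PySem.List.slice arr none (some i))) = true) ∧
   ((arr.length : Int) < n → (isdizengA arr || isdizengdijianA arr) = true))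

instance (n : Int) (arr : List Int) (res : Int) : Decidable (Pre_panduan n arr res) := by
  unfold Pre_panduan; infer_instance

def pvWitness_panduan : Int × List Int × Int := (3, [1, 2, 1], 0)

-- On inputs where the guard fails and some prefix arr[:i] with 1 ≤ i ≤ n is neither
-- strictly increasing nor strictly unimodal, A's repair branch fires and always ends in
-- RecursionError or IndexError (it never returns); B returns None there.
def Raises_panduan (n : Int) (arr : List Int) (res : Int) : Prop :=
  (isdijianA arr || isdizengA arr || isdizengdijianA arr) = false ∧
  ∃ i ∈ PySem.List.pyRange 1 (min (n + 1) ((arr.length : Int) + 1)),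
    (isdizengA (PySem.List.slice arr none (some i)) ||
     isdizengdijianA (PySem.List.slice arr none (some i))) = false

instance (n : Int) (arr : List Int) (res : Int) : Decidable (Raises_panduan n arr res) := by
  unfold Raises_panduan; infer_instance

def pvRaiseWitness_panduan : Int × List Int × Int := (2, [0, 0], 0)
def pvRaiseWitnessOut_panduan : Option Int := none

def Spec_panduan (n : Int) (arr : List Int) (res : Int) (out : Option Int) : Prop :=
  out = panduan_alt n arr res
instance (n : Int) (arr : List Int) (res : Int) (out : Option Int) :
    Decidable (Spec_panduan n arr res out) := by unfold Spec_panduan; infer_instance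

-- ===== CLAIM (what is proved, stated in full; the proofs are below) =====
def Claim_equal_panduan : Prop := ∀ (n : Int) (arr : List Int) (res : Int),
  Dom_panduan n arr res → Pre_panduan n arr res → Spec_panduan n arr res (panduan n arr res)

def Claim_raises_panduan : Prop :=
  (∀ (n : Int) (arr : List Int) (res : Int), Dom_panduan n arr res →
      Raises_panduan n arr res → ¬ Pre_panduan n arr res) ∧
  (Dom_panduan (pvRaiseWitness_panduan.1) (pvRaiseWitness_panduan.2.1) (pvRaiseWitness_panduan.2.2) ∧
   Raises_panduan (pvRaiseWitness_panduan.1) (pvRaiseWitness_panduan.2.1) (pvRaiseWitness_panduan.2.2) ∧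
   panduan_alt (pvRaiseWitness_panduan.1) (pvRaiseWitness_panduan.2.1) (pvRaiseWitness_panduan.2.2) = pvRaiseWitnessOut_panduan)

-- ===== LEMMAS AND PROOFS =====

lemma le_upGo (arr : List Int) (f k : Nat) : k ≤ upGo arr f k := by
  induction f generalizing k with
  | zero => simp [upGo]
  | succ f ih =>
    rw [upGo]; split
    · exact le_trans (Nat.le_succ k) (ih (k+1))
    · exact le_refl k

lemma upGo_le (arr : List Int) (f k : Nat) : upGo arr f k ≤ k + f := by
  induction f generalizing k with
  | zero => simp [upGo]
  | succ f ih =>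
    rw [upGo]; split
    · exact le_trans (ih (k+1)) (by omega)
    · omega

lemma upGo_pairs (arr : List Int) (f k : Nat) :
    ∀ j, k ≤ j → j < upGo arr f k → arr.getD (j - 1) 0 < arr.getD j 0 := by
  induction f generalizing k with
  | zero => intro j h1 h2; simp [upGo] at h2; omega
  | succ f ih =>
    intro j h1 h2
    rw [upGo] at h2; split at h2
    · rcases Nat.eq_or_lt_of_le h1 with rfl | hlt
      · assumption
      · exact ih (k+1) j hlt h2
    · omega
lemma upGo_stop (arr : List Int) (f k : Nat) (h : upGo arr f k < k + f) :
    ¬ arr.getD (upGo arr f k - 1) 0 < arr.getD (upGo arr f k) 0 := by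
  induction f generalizing k with
  | zero => simp [upGo] at h
  | succ f ih =>
    rw [upGo] at h ⊢; split at h
    · rename_i hc; rw [if_pos hc] at *; exact ih (k+1) (by omega)
    · rename_i hc; rw [if_neg hc]; exact hc

lemma downGo_pairs (arr : List Int) (f k : Nat) :
    ∀ j, k ≤ j → j < downGo arr f k → arr.getD j 0 < arr.getD (j - 1) 0 := by
  induction f generalizing k with
  | zero => intro j h1 h2; simp [downGo] at h2; omega
  | succ f ih =>
    intro j h1 h2
    rw [downGo] at h2; split at h2
    · rcases Nat.eq_or_lt_of_le h1 with rfl | hlt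
      · assumption
      · exact ih (k+1) j hlt h2
    · omega

lemma downGo_reach (arr : List Int) (f k : Nat)
    (h : ∀ j, k ≤ j → j < k + f → arr.getD j 0 < arr.getD (j - 1) 0) :
    k + f ≤ downGo arr f k := by
  induction f generalizing k with
  | zero => simp [downGo]
  | succ f ih =>
    rw [downGo, if_pos (h k (le_refl k) (by omega))]
    have := ih (k+1) (fun j hj1 hj2 => h j (by omega) (by omega))
    omega

lemma dizeng_char (l : List Int) : isdizengA l = true ↔
    ∀ j : Nat, 1 ≤ j → j < l.length → l.getD (j - 1) 0 < l.getD j 0 := by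
  rw [isdizengA, List.all_eq_true]
  constructor
  · intro h j hj1 hj2
    have hm : (j : Int) ∈ PySem.List.pyRange 1 l.length :=
      PySem.List.mem_pyRange_one.mpr ⟨by exact_mod_cast hj1, by exact_mod_cast hj2⟩
    have hc : ((j : Int)) - 1 = ((j - 1 : Nat) : Int) := by omega
    have := h _ hm
    simp only [hc, PySem.List.pyGetD_natCast, Bool.not_eq_eq_eq_not, Bool.not_true,
      decide_eq_false_iff_not, not_le] at this
    exact this
  · intro h i hi
    obtain ⟨h1, h2⟩ := PySem.List.mem_pyRange_one.mp hi
    obtain ⟨j, rfl⟩ := Int.eq_ofNat_of_zero_le (by omega : (0:Int) ≤ i)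
    have hc : ((j : Int)) - 1 = ((j - 1 : Nat) : Int) := by omega
    simp only [hc, PySem.List.pyGetD_natCast, Bool.not_eq_eq_eq_not, Bool.not_true,
      decide_eq_false_iff_not, not_le]
    exact h j (by exact_mod_cast h1) (by exact_mod_cast h2)

lemma dijian_char (l : List Int) : isdijianA l = true ↔
    ∀ j : Nat, 1 ≤ j → j < l.length → l.getD j 0 < l.getD (j - 1) 0 := by
  rw [isdijianA, List.all_eq_true]
  constructor
  · intro h j hj1 hj2
    have hm : (j : Int) ∈ PySem.List.pyRange 1 l.length :=
      PySem.List.mem_pyRange_one.mpr ⟨by exact_mod_cast hj1, by exact_mod_cast hj2⟩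
    have hc : ((j : Int)) - 1 = ((j - 1 : Nat) : Int) := by omega
    have := h _ hm
    simp only [hc, PySem.List.pyGetD_natCast, Bool.not_eq_eq_eq_not, Bool.not_true,
      decide_eq_false_iff_not, ge_iff_le, not_le] at this
    exact this
  · intro h i hi
    obtain ⟨h1, h2⟩ := PySem.List.mem_pyRange_one.mp hi
    obtain ⟨j, rfl⟩ := Int.eq_ofNat_of_zero_le (by omega : (0:Int) ≤ i)
    have hc : ((j : Int)) - 1 = ((j - 1 : Nat) : Int) := by omega
    simp only [hc, PySem.List.pyGetD_natCast, Bool.not_eq_eq_eq_not, Bool.not_true,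
      decide_eq_false_iff_not, ge_iff_le, not_le]
    exact h j (by exact_mod_cast h1) (by exact_mod_cast h2)

lemma getD_take (l : List Int) (t j : Nat) (h : j < t) :
    (l.take t).getD j 0 = l.getD j 0 := by
  simp [List.getD_eq_getElem?_getD, h]
lemma getD_drop (l : List Int) (m j : Nat) :
    (l.drop m).getD j 0 = l.getD (m + j) 0 := by
  simp [List.getD_eq_getElem?_getD, List.getElem?_drop]


def UniAt (arr : List Int) (p : Nat) : Prop :=
  (∀ j, 1 ≤ j → j < p → arr.getD (j - 1) 0 < arr.getD j 0) ∧
  (∀ j, p ≤ j → j < arr.length → arr.getD j 0 < arr.getD (j - 1) 0)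

lemma incr_mono (arr : List Int) (p : Nat)
    (h : ∀ j, 1 ≤ j → j < p → arr.getD (j - 1) 0 < arr.getD j 0) :
    ∀ a b : Nat, a ≤ b → b < p → arr.getD a 0 ≤ arr.getD b 0 := by
  intro a b hab hbp
  induction b with
  | zero => have ha : a = 0 := Nat.le_zero.mp hab; rw [ha]
  | succ b ih =>
    rcases Nat.eq_or_lt_of_le hab with rfl | hlt
    · exact le_refl _
    · have h1 := ih (by omega) (by omega)
      have h2 := h (b + 1) (by omega) hbp
      simp only [Nat.add_sub_cancel] at h2
      exact le_trans h1 (le_of_lt h2)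

lemma decr_mono (arr : List Int) (p : Nat)
    (h : ∀ j, p ≤ j → j < arr.length → arr.getD j 0 < arr.getD (j - 1) 0) :
    ∀ a b : Nat, p - 1 ≤ a → a ≤ b → b < arr.length → arr.getD b 0 ≤ arr.getD a 0 := by
  intro a b hpa hab hbL
  induction b with
  | zero => have ha : a = 0 := Nat.le_zero.mp hab; rw [ha]
  | succ b ih =>
    rcases Nat.eq_or_lt_of_le hab with rfl | hlt
    · exact le_refl _
    · have h1 := ih (by omega) (by omega)
      have h2 := h (b + 1) (by omega) hbL
      simp only [Nat.add_sub_cancel] at h2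
      exact le_trans (le_of_lt h2) h1

lemma guard_iff (arr : List Int) :
    (isdijianA arr || isdizengA arr || isdizengdijianA arr) = true ↔
    ∃ p, 1 ≤ p ∧ UniAt arr p := by
  constructor
  · intro hg
    simp only [Bool.or_eq_true] at hg
    rcases hg with (h | h) | h
    · -- dijian: p = 1
      exact ⟨1, le_refl 1, fun j h1 h2 => by omega, fun j _ hj => (dijian_char arr).mp h j (by omega) hj⟩
    · -- dizeng: p = max L 1
      refine ⟨max arr.length 1, by omega, fun j h1 h2 => (dizeng_char arr).mp h j h1 (by omega), fun j hj1 hj2 => by omega⟩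
    · -- dizengdijian
      unfold isdizengdijianA at h
      cases hmax : PySem.List.max? arr (fun x => x) with
      | none =>
        have : arr = [] := (PySem.List.max?_eq_none_iff arr _).mp hmax
        exact ⟨1, le_refl 1, fun j h1 h2 => by omega, fun j hj1 hj2 => by simp [this] at hj2⟩
      | some mx =>
        rw [hmax] at h
        dsimp only at h
        cases hidx : PySem.List.index? arr mx with
        | none =>
          exact absurd (PySem.List.max?_mem hmax)
            ((PySem.List.index?_eq_none_iff arr mx).mp hidx)
        | some m =>
          rw [hidx] at h
          dsimp only at h
          obtain ⟨hmlt, _, _⟩ := PySem.List.getElem_of_index?_eq_some hidx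
          obtain ⟨hz, hd⟩ := Bool.and_eq_true_iff.mp h
          have hcast : ((m : Int)) + 1 = ((m + 1 : Nat) : Int) := by push_cast; ring
          rw [PySem.List.slice_zero_start, hcast, PySem.List.slice_to_natCast] at hz
          rw [PySem.List.slice_from_natCast] at hd
          have hlen_take : (arr.take (m+1)).length = m + 1 := by
            simp [List.length_take]; omega
          have hlen_drop : (arr.drop m).length = arr.length - m := by simp
          refine ⟨m + 1, by omega, ?_, ?_⟩
          · intro j h1 h2
            have := (dizeng_char _).mp hz j h1 (by rw [hlen_take]; omega)
            rwa [getD_take _ _ _ (by omega), getD_take _ _ _ (by omega)] at this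
          · intro j hj1 hj2
            have := (dijian_char _).mp hd (j - m) (by omega) (by rw [hlen_drop]; omega)
            rw [getD_drop, getD_drop] at this
            have e1 : m + (j - m) = j := by omega
            have e2 : m + (j - m - 1) = j - 1 := by omega
            rwa [e1, e2] at this
  · rintro ⟨p, hp1, hU⟩
    simp only [Bool.or_eq_true]
    by_cases hL : arr.length = 0
    · exact Or.inl (Or.inl ((dijian_char arr).mpr (fun j h1 h2 => by omega)))
    by_cases hpL : arr.length ≤ p
    · exact Or.inl (Or.inr ((dizeng_char arr).mpr (fun j h1 h2 => hU.1 j h1 (by omega))))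
    -- interior peak q = p - 1
    push Not at hpL
    have hq : p - 1 < arr.length := by omega
    have hmaxval : ∀ j, j < arr.length → j ≠ p - 1 → arr.getD j 0 < arr.getD (p - 1) 0 := by
      intro j hjL hne
      rcases Nat.lt_or_ge j (p - 1) with hlt | hge
      · calc arr.getD j 0 ≤ arr.getD (p - 1 - 1) 0 :=
              incr_mono arr p hU.1 j (p - 1 - 1) (by omega) (by omega)
          _ < arr.getD (p - 1) 0 := by
              have := hU.1 (p - 1) (by omega) (by omega)
              exact this
      · have hjgt : p - 1 < j := by omega
        calc arr.getD j 0 ≤ arr.getD p 0 :=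
              decr_mono arr p hU.2 p j (by omega) (by omega) hjL
          _ < arr.getD (p - 1) 0 := by
              have := hU.2 p (le_refl p) (by omega)
              exact this
    have hle : ∀ j, j < arr.length → arr.getD j 0 ≤ arr.getD (p - 1) 0 := by
      intro j hjL
      by_cases hne : j = p - 1
      · subst hne; exact le_refl _
      · exact le_of_lt (hmaxval j hjL hne)
    cases hmax : PySem.List.max? arr (fun x => x) with
    | none =>
      have he : arr = [] := (PySem.List.max?_eq_none_iff arr _).mp hmax
      rw [he] at hq
      simp at hq
    | some mx =>
      have hmem := PySem.List.max?_mem hmax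
      have hisMax := PySem.List.max?_isMax hmax
      have hgetq : arr.getD (p-1) 0 = arr[p-1]'(by omega) := List.getD_eq_getElem arr 0 (by omega)
      have hqmem : arr.getD (p-1) 0 ∈ arr := by rw [hgetq]; exact List.getElem_mem _
      have hmx_eq : mx = arr.getD (p-1) 0 := by
        obtain ⟨jm, hjm, hjme⟩ := List.mem_iff_getElem.mp hmem
        have : mx = arr.getD jm 0 := by rw [List.getD_eq_getElem arr 0 hjm, hjme]
        have h1 : mx ≤ arr.getD (p-1) 0 := by rw [this]; exact hle jm hjm
        have h2 : arr.getD (p-1) 0 ≤ mx := hisMax _ hqmem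
        omega
      have hsome : (PySem.List.index? arr mx).isSome := (PySem.List.index?_isSome_iff arr mx).mpr hmem
      obtain ⟨m, hidx⟩ := Option.isSome_iff_exists.mp hsome
      obtain ⟨hmlt, hm_eq, _⟩ := PySem.List.getElem_of_index?_eq_some hidx
      have hm_q : m = p - 1 := by
        by_contra hne
        have hlt := hmaxval m hmlt hne
        have hgm : arr.getD m 0 = mx := by rw [List.getD_eq_getElem arr 0 hmlt, hm_eq]
        rw [hgm, hmx_eq] at hlt
        exact absurd hlt (lt_irrefl _)
      refine Or.inr ?_
      unfold isdizengdijianA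
      rw [hmax]
      dsimp only
      rw [hidx]
      dsimp only
      rw [hm_q]
      have hcast : (((p-1 : Nat) : Int)) + 1 = ((p : Nat) : Int) := by omega
      rw [PySem.List.slice_zero_start, hcast, PySem.List.slice_to_natCast,
        PySem.List.slice_from_natCast]
      refine Bool.and_eq_true_iff.mpr ⟨?_, ?_⟩
      · refine (dizeng_char _).mpr ?_
        intro j h1 h2
        rw [List.length_take] at h2
        rw [getD_take _ _ _ (by omega), getD_take _ _ _ (by omega)]
        exact hU.1 j h1 (by omega)
      · refine (dijian_char _).mpr ?_
        intro j h1 h2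
        rw [List.length_drop] at h2
        rw [getD_drop, getD_drop]
        have e2 : p - 1 + (j - 1) = (p - 1 + j) - 1 := by omega
        rw [e2]
        exact hU.2 (p - 1 + j) (by omega) (by omega)

lemma scan_complete_iff (arr : List Int) :
    (arr.length ≤ downGo arr (arr.length - upGo arr (arr.length - 1) 1) (upGo arr (arr.length - 1) 1)) ↔
    ∃ p, 1 ≤ p ∧ UniAt arr p := by
  constructor
  · intro hM
    refine ⟨upGo arr (arr.length - 1) 1, le_upGo arr _ 1, upGo_pairs arr _ 1, ?_⟩
    intro j hj1 hj2
    exact downGo_pairs arr _ _ j hj1 (lt_of_lt_of_le hj2 hM)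
  · rintro ⟨p, hp1, hU⟩
    by_cases hL : arr.length = 0
    · omega
    have hK1 : 1 ≤ upGo arr (arr.length - 1) 1 := le_upGo arr _ 1
    have hKle : upGo arr (arr.length - 1) 1 ≤ arr.length := by
      have := upGo_le arr (arr.length - 1) 1
      omega
    rcases Nat.eq_or_lt_of_le hKle with heq | hKlt
    · rw [heq]
      have h0 : arr.length - arr.length = 0 := by omega
      rw [h0, downGo]
    · -- the up-scan stopped strictly inside the list; it stopped at or after p
      have hstop := upGo_stop arr (arr.length - 1) 1 (by omega)
      have hpK : p ≤ upGo arr (arr.length - 1) 1 := by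
        by_contra hc
        push Not at hc
        exact hstop (hU.1 _ hK1 hc)
      have hreach := downGo_reach arr (arr.length - upGo arr (arr.length - 1) 1)
        (upGo arr (arr.length - 1) 1) (fun j hj1 hj2 => hU.2 j (le_trans hpK hj1) (by omega))
      omega

lemma loopA_none (recur : List Int → Int → Option Int) (arr : List Int) (res : Int)
    (l : List Int)
    (h : ∀ i ∈ l, (isdizengA (PySem.List.slice arr none (some i)) ||
                   isdizengdijianA (PySem.List.slice arr none (some i))) = true) :
    loopA recur arr res l = none := by
  induction l with
  | nil => rfl
  | cons i rest ih =>
    rw [loopA]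
    have hor := h i (List.mem_cons_self ..)
    have hcond : (!isdizengdijianA (PySem.List.slice arr none (some i)) &&
       !isdizengA (PySem.List.slice arr none (some i)) &&
       !isdizengA (PySem.List.slice arr none (some i))) = false := by
      cases hA : isdizengA (PySem.List.slice arr none (some i)) <;>
        cases hB : isdizengdijianA (PySem.List.slice arr none (some i)) <;>
        simp_all
    rw [hcond]
    simp only [Bool.false_eq_true, if_false]
    exact ih (fun j hj => h j (List.mem_cons_of_mem _ hj))

-- the bounded form of Pre_'s quantifier covers the whole of A's range(1, n+1)
lemma pre_loop_expand (n : Int) (arr : List Int)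
    (h1 : ∀ i ∈ PySem.List.pyRange 1 (min (n + 1) ((arr.length : Int) + 1)),
        (isdizengA (PySem.List.slice arr none (some i)) ||
         isdizengdijianA (PySem.List.slice arr none (some i))) = true)
    (h2 : (arr.length : Int) < n → (isdizengA arr || isdizengdijianA arr) = true) :
    ∀ i ∈ PySem.List.pyRange 1 (n + 1),
      (isdizengA (PySem.List.slice arr none (some i)) ||
       isdizengdijianA (PySem.List.slice arr none (some i))) = true := by
  intro i hi
  obtain ⟨ha, hb⟩ := PySem.List.mem_pyRange_one.mp hi
  by_cases hc : i ≤ (arr.length : Int)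
  · exact h1 i (PySem.List.mem_pyRange_one.mpr ⟨ha, by omega⟩)
  · have hslice : PySem.List.slice arr none (some i) = arr := by
      rw [PySem.List.slice_to arr (by omega : (0:Int) ≤ i)]
      exact List.take_of_length_le (by omega)
    rw [hslice]
    exact h2 (by omega)

-- ===== VERDICT (by name: the statements are the Claim_ definitions above) =====
theorem panduan_spec : Claim_equal_panduan := by
  intro n arr res _hdom hpre
  unfold Spec_panduan panduan panduan_alt
  rw [show (1000 : Nat) = 999 + 1 from rfl, panduanA]
  by_cases hg : (isdijianA arr || isdizengA arr || isdizengdijianA arr) = true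
  · rw [if_pos hg]
    have hscan := (scan_complete_iff arr).mpr ((guard_iff arr).mp hg)
    simp only [hscan, if_pos]
  · have hloop := hpre.resolve_left hg
    rw [if_neg hg, loopA_none _ _ _ _ (pre_loop_expand n arr hloop.1 hloop.2)]
    have hns : ¬ arr.length ≤ downGo arr (arr.length - upGo arr (arr.length - 1) 1)
        (upGo arr (arr.length - 1) 1) :=
      fun hle => hg ((guard_iff arr).mpr ((scan_complete_iff arr).mp hle))
    simp only [hns, if_false]

@[simp] theorem panduan_raises : Claim_raises_panduan := by
  unfold Claim_raises_panduan
  exact ⟨by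
    rintro n arr res _hdom ⟨hg, i, hi, hfail⟩ hpre
    rcases hpre with h | ⟨hall, _⟩
    · rw [hg] at h; exact Bool.false_ne_true h
    · rw [hall i hi] at hfail; simp at hfail,
   by decide⟩
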